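-- pv_equiv track=rewrite | github.com/pulilohith/hash | imphashmed.py | threeelement
-- ===== SOURCE A (Python) =====
-- def threeelement(arr1,arr2,arr3,sums):
--     mp={}
--     for i in arr1:
--         mp[i]=1
--     for i in arr2:
--         for j in arr3:
--
--             if(sums-(i+j)  in mp):
--                 return "yes"
--     return "No"
-- ===== SOURCE B (Python) =====
-- def threeelement(arr1, arr2, arr3, sums):
--     # Precompute the set of all pairwise sums of arr1 x arr2 in one comprehension,
--     # then recursively scan arr3 for a k with sums - k in the table.
--     table = {a + b for a in arr1 for b in arr2}
--
--     def scan(rest):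
--         if not rest:
--             return "No"
--         if sums - rest[0] in table:
--             return "yes"
--         return scan(rest[1:])
--
--     return scan(arr3)
-- ===== Notes on version B (the rewrite author's own statement) =====
-- stated objective: alternative
-- what changed: Instead of hashing arr1 and scanning arr2 x arr3 with a nested loop and early return, B precomputes the set of all pairwise sums over arr1 x arr2 with one comprehension and then recursively scans arr3 testing 'sums - k' membership.
import Mathlib
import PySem

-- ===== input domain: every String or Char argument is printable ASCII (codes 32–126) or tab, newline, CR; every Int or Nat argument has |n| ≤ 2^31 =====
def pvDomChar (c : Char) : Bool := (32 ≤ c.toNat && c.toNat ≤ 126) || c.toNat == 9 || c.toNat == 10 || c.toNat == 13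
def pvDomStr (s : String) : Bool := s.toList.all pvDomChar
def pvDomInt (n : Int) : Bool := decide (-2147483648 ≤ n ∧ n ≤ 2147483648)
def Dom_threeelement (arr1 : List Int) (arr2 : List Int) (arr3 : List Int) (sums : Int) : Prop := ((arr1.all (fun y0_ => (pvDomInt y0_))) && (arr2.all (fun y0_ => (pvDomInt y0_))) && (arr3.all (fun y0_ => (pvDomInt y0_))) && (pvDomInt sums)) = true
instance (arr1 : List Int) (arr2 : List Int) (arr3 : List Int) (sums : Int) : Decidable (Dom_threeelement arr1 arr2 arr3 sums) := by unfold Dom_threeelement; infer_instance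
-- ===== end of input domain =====

-- B replaces A's hash-of-arr1 plus nested arr2×arr3 scan by a precomputed set of
-- pairwise sums over arr1×arr2 followed by a recursive scan over arr3 (alternative shape, same cost class).

-- ===== PORT A =====
-- mp = {i: 1 for i in arr1}; nested loop over arr2, arr3 with early return.
def threeelement (arr1 : List Int) (arr2 : List Int) (arr3 : List Int) (sums : Int) : String :=
  let mp : PySem.Dict Int Int := arr1.foldl (fun d i => d.insert i 1) PySem.Dict.empty
  if arr2.any (fun i => arr3.any (fun j => mp.contains (sums - (i + j)))) then "yes" else "No"

-- ===== PORT B =====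
-- recursive helper scan: first element hit → "yes", exhausted → "No".
def pvScan (table : PySem.Set Int) (sums : Int) : List Int → String
  | [] => "No"
  | k :: rest => if PySem.Set.contains table (sums - k) then "yes" else pvScan table sums rest

-- table = {a + b for a in arr1 for b in arr2} (comprehension → flatMap, then set-of-list).
def threeelement_alt (arr1 : List Int) (arr2 : List Int) (arr3 : List Int) (sums : Int) : String :=
  let table : PySem.Set Int := PySem.Set.ofList (arr1.flatMap (fun a => arr2.map (fun b => a + b)))
  pvScan table sums arr3

-- ===== PRECONDITION & SPEC =====
def Spec_threeelement (arr1 : List Int) (arr2 : List Int) (arr3 : List Int) (sums : Int) (out : String) : Prop := out = threeelement_alt arr1 arr2 arr3 sums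
instance (arr1 : List Int) (arr2 : List Int) (arr3 : List Int) (sums : Int) (out : String) : Decidable (Spec_threeelement arr1 arr2 arr3 sums out) := by unfold Spec_threeelement; infer_instance

-- ===== CLAIM (what is proved, stated in full; the proofs are below) =====
def Claim_equal_threeelement : Prop := ∀ (arr1 : List Int) (arr2 : List Int) (arr3 : List Int) (sums : Int), Dom_threeelement arr1 arr2 arr3 sums → Spec_threeelement arr1 arr2 arr3 sums (threeelement arr1 arr2 arr3 sums)

-- ===== LEMMAS AND PROOFS =====

-- A's dict contains x iff x ∈ arr1.
lemma contains_foldl_insert_one (arr1 : List Int) (x : Int) :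
    (arr1.foldl (fun d i => d.insert i 1) (PySem.Dict.empty : PySem.Dict Int Int)).contains x
      = decide (x ∈ arr1) := by
  rw [PySem.Dict.contains_eq_decide_mem_keys, PySem.Dict.keys_foldl_insert]
  simp [PySem.Dict.keys_empty, PySem.Set.update_nil_left, PySem.Set.mem_ofList]

-- B's recursive scan, characterised as a single existential test.
lemma pvScan_eq_if (table : PySem.Set Int) (sums : Int) (l : List Int) :
    pvScan table sums l = if ∃ k ∈ l, sums - k ∈ table then "yes" else "No" := by
  induction l with
  | nil => simp [pvScan]
  | cons k rest ih =>
    simp only [pvScan, PySem.Set.contains, List.contains_iff_mem, ih, List.mem_cons]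
    by_cases h : sums - k ∈ table
    · simp [h]
    · simp only [h, decide_false, if_false]
      refine if_congr ?_ rfl rfl
      constructor
      · rintro ⟨x, hx, hm⟩; exact ⟨x, List.mem_cons_of_mem _ hx, hm⟩
      · rintro ⟨x, hx, hm⟩
        rcases List.mem_cons.mp hx with rfl | hx'
        · exact absurd hm h
        · exact ⟨x, hx', hm⟩

-- ===== VERDICT (by name: the statement is the Claim_ definition above) =====
theorem threeelement_spec : Claim_equal_threeelement := by
  intro arr1 arr2 arr3 sums _
  unfold Spec_threeelement threeelement threeelement_alt
  rw [pvScan_eq_if]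
  simp only [contains_foldl_insert_one, List.any_eq_true, decide_eq_true_eq,
    PySem.Set.mem_ofList, List.mem_flatMap, List.mem_map]
  refine if_congr ?_ rfl rfl
  constructor
  · rintro ⟨i, hi, j, hj, hmem⟩
    exact ⟨j, hj, sums - (i + j), hmem, i, hi, by omega⟩
  · rintro ⟨k, hk, a, ha, b, hb, hab⟩
    refine ⟨b, hb, k, hk, ?_⟩
    rw [show sums - (b + k) = a by omega]; exact ha
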